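-- pv_equiv track=rewrite | github.com/tpavic1/ABI | chapter2/BA2G.py | Count
-- ===== SOURCE A (Python) =====
-- def Count(motifs):
--     rows=4
--     cols=len(motifs[0])
--     count=[[0]*cols for i in range(rows)]
--     for i in range(cols):
--         for motif in motifs:
--             if(motif[i]=="A"):
--                 count[0][i]+=1
--             elif(motif[i]=="C"):
--                 count[1][i]+=1
--             elif(motif[i]=="G"):
--                 count[2][i]+=1
--             else:
--                 count[3][i]+=1
--     count=[list(map(lambda x: x+1,row)) for row in count]
--     return count
-- ===== SOURCE B (Python) =====
-- def Count(motifs):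
--     n = len(motifs)
--     cols = len(motifs[0])
--     # one row-major pass: flat histogram keyed by (column, character)
--     freq = {}
--     for motif in motifs:
--         for i in range(cols):
--             key = (i, motif[i])
--             freq[key] = freq.get(key, 0) + 1
--     rowA = [freq.get((i, "A"), 0) + 1 for i in range(cols)]
--     rowC = [freq.get((i, "C"), 0) + 1 for i in range(cols)]
--     rowG = [freq.get((i, "G"), 0) + 1 for i in range(cols)]
--     rowT = [n - freq.get((i, "A"), 0) - freq.get((i, "C"), 0) - freq.get((i, "G"), 0) + 1
--             for i in range(cols)]
--     return [rowA, rowC, rowG, rowT]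
-- ===== Notes on version B (the rewrite author's own statement) =====
-- stated objective: alternative
-- what changed: A does a column-major branching pass incrementing cells of a mutable 4xcols matrix; B does one row-major pass building a single flat dict histogram keyed by (column, character) and then reads each output row off that histogram by lookup, with the fourth row derived as len(motifs) minus the A/C/G lookups to honor the else catch-all.
import Mathlib
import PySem

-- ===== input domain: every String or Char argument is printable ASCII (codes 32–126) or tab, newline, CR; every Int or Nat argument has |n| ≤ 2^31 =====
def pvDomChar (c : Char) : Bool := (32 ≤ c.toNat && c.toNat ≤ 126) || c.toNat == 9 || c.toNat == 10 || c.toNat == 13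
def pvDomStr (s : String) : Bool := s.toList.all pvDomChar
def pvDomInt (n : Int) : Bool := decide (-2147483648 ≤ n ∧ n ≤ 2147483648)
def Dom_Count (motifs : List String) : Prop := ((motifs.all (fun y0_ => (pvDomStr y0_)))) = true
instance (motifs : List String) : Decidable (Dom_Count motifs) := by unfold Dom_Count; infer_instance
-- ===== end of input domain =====

-- B replaces A's column-major branching pass over a mutable 4×cols matrix by a single row-major
-- pass building one flat dict histogram keyed by (column, character), from which the four rows
-- are read off by lookup (row 3 = total minus the A/C/G lookups); objective: alternative, not speed.

-- ===== PORT A =====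
def Count (motifs : List String) : List (List Int) :=
  let cols : Int := PySem.Str.len (PySem.List.pyGetD motifs 0 "")   -- motifs[0]; default "" never used under Pre_
  let count : List (List Int) := (PySem.List.pyRange 0 4 1).map (fun _ => List.replicate cols.toNat (0 : Int))
  let count := (PySem.List.pyRange 0 cols 1).foldl (fun count i =>
    motifs.foldl (fun count motif =>
      let ch := (PySem.Str.pyGet? motif i).getD ' '   -- motif[i]; exact under Pre_ (index in range)
      if ch = 'A' then count.modify 0 (fun row => row.modify i.toNat (· + 1))
      else if ch = 'C' then count.modify 1 (fun row => row.modify i.toNat (· + 1))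
      else if ch = 'G' then count.modify 2 (fun row => row.modify i.toNat (· + 1))
      else count.modify 3 (fun row => row.modify i.toNat (· + 1))) count) count
  count.map (fun row => row.map (fun x => x + 1))

-- ===== PORT B =====
def Count_alt (motifs : List String) : List (List Int) :=
  let n : Int := PySem.List.len motifs
  let cols : Int := PySem.Str.len (PySem.List.pyGetD motifs 0 "")   -- motifs[0]; default "" never used under Pre_
  let freq : PySem.Dict (Int × Char) Int :=
    motifs.foldl (fun freq motif =>
      (PySem.List.pyRange 0 cols 1).foldl (fun freq i =>
        let key : Int × Char := (i, (PySem.Str.pyGet? motif i).getD ' ')   -- motif[i]; exact under Pre_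
        freq.insert key (freq.getD key 0 + 1)) freq) PySem.Dict.empty
  let rowA := (PySem.List.pyRange 0 cols 1).map (fun i => freq.getD (i, 'A') 0 + 1)
  let rowC := (PySem.List.pyRange 0 cols 1).map (fun i => freq.getD (i, 'C') 0 + 1)
  let rowG := (PySem.List.pyRange 0 cols 1).map (fun i => freq.getD (i, 'G') 0 + 1)
  let rowT := (PySem.List.pyRange 0 cols 1).map (fun i =>
    n - freq.getD (i, 'A') 0 - freq.getD (i, 'C') 0 - freq.getD (i, 'G') 0 + 1)
  [rowA, rowC, rowG, rowT]

-- ===== PRECONDITION & SPEC =====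
-- Pre_ excludes exactly the inputs on which Python A raises IndexError: an empty motif list
-- (motifs[0]) or a motif shorter than the first one (motif[i]).
def Pre_Count (motifs : List String) : Prop :=
  motifs ≠ [] ∧ ∀ m ∈ motifs, (motifs.head?.getD "").toList.length ≤ m.toList.length
instance (motifs : List String) : Decidable (Pre_Count motifs) := by unfold Pre_Count; infer_instance
def pvWitness_Count : List String := ["AC", "GT"]

def Spec_Count (motifs : List String) (out : List (List Int)) : Prop := out = Count_alt motifs
instance (motifs : List String) (out : List (List Int)) : Decidable (Spec_Count motifs out) := by unfold Spec_Count; infer_instance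

-- ===== CLAIM (what is proved, stated in full; the proofs are below) =====
def Claim_equal_Count : Prop := ∀ (motifs : List String), Dom_Count motifs → Pre_Count motifs → Spec_Count motifs (Count motifs)

-- ===== LEMMAS AND PROOFS =====

-- the column of characters at index i (both ports inspect exactly these values)
def pvCol (motifs : List String) (i : Int) : List Char :=
  motifs.map (fun m => (PySem.Str.pyGet? m i).getD ' ')

def pvNotACG (c : Char) : Bool := !(c == 'A' || c == 'C' || c == 'G')

-- A's loop body, named so the lemmas can speak about it (defeq to the lambda in the port)
def pvStepA (i : Int) (count : List (List Int)) (motif : String) : List (List Int) :=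
  let ch := (PySem.Str.pyGet? motif i).getD ' '
  if ch = 'A' then count.modify 0 (fun row => row.modify i.toNat (· + 1))
  else if ch = 'C' then count.modify 1 (fun row => row.modify i.toNat (· + 1))
  else if ch = 'G' then count.modify 2 (fun row => row.modify i.toNat (· + 1))
  else count.modify 3 (fun row => row.modify i.toNat (· + 1))

lemma modify_id (l : List Int) (k : Nat) : l.modify k (fun x => x) = l := by
  apply List.ext_getElem (by simp)
  intro j h1 h2
  simp [List.getElem_modify]

lemma modify_modify_add (l : List Int) (k : Nat) (a b : Int) :
    (l.modify k (· + a)).modify k (· + b) = l.modify k (· + (b + a)) := by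
  apply List.ext_getElem (by simp)
  intro j h1 h2
  simp [List.getElem_modify]
  split_ifs <;> ring_nf

-- inner loop of A over the motifs, at a fixed column i, acting on a 4-row matrix
lemma inner_fold (ms : List String) (i : Int) (r0 r1 r2 r3 : List Int) :
    ms.foldl (pvStepA i) [r0, r1, r2, r3]
    = [r0.modify i.toNat (· + ((pvCol ms i).count 'A' : Int)),
       r1.modify i.toNat (· + ((pvCol ms i).count 'C' : Int)),
       r2.modify i.toNat (· + ((pvCol ms i).count 'G' : Int)),
       r3.modify i.toNat (· + ((pvCol ms i).countP pvNotACG : Int))] := by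
  induction ms generalizing r0 r1 r2 r3 with
  | nil => simp [pvCol, modify_id]
  | cons m ms ih =>
    have hcol : pvCol (m :: ms) i = ((PySem.Str.pyGet? m i).getD ' ') :: pvCol ms i := by
      simp [pvCol]
    rw [List.foldl_cons,
        show pvStepA i [r0, r1, r2, r3] m =
          (if (PySem.Str.pyGet? m i).getD ' ' = 'A' then [r0.modify i.toNat (· + 1), r1, r2, r3]
           else if (PySem.Str.pyGet? m i).getD ' ' = 'C' then [r0, r1.modify i.toNat (· + 1), r2, r3]
           else if (PySem.Str.pyGet? m i).getD ' ' = 'G' then [r0, r1, r2.modify i.toNat (· + 1), r3]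
           else [r0, r1, r2, r3.modify i.toNat (· + 1)]) from by
          simp only [pvStepA]; split_ifs <;> rfl,
        hcol]
    generalize (PySem.Str.pyGet? m i).getD ' ' = ch
    by_cases hA : ch = 'A'
    · rw [if_pos hA, ih, modify_modify_add, hA]
      simp [pvNotACG]
    · by_cases hC : ch = 'C'
      · rw [if_neg hA, if_pos hC, ih, modify_modify_add, hC]
        simp [pvNotACG]
      · by_cases hG : ch = 'G'
        · rw [if_neg hA, if_neg hC, if_pos hG, ih, modify_modify_add, hG]
          simp [pvNotACG]
        · rw [if_neg hA, if_neg hC, if_neg hG, ih, modify_modify_add]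
          have hP : pvNotACG ch = true := by simp [pvNotACG, hA, hC, hG]
          simp [hP, hA, hC, hG]

-- partially-filled row of A's matrix: columns < k already counted, the rest still 0
def pvPart (cnt : Nat → Int) (cols k : Nat) : List Int :=
  (List.range cols).map (fun j => if j < k then cnt j else 0)

lemma part_zero (cnt : Nat → Int) (cols : Nat) :
    pvPart cnt cols 0 = List.replicate cols (0 : Int) := by
  apply List.ext_getElem (by simp [pvPart])
  intro j h1 h2
  simp [pvPart]

lemma part_modify (cnt : Nat → Int) (cols k : Nat) :
    (pvPart cnt cols k).modify k (· + cnt k) = pvPart cnt cols (k + 1) := by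
  apply List.ext_getElem (by simp [pvPart])
  intro j h1 h2
  simp only [pvPart, List.getElem_modify, List.getElem_map, List.getElem_range]
  by_cases h : k = j
  · subst h; simp
  · simp only [if_neg h]
    split_ifs <;> first | rfl | omega

-- outer loop of A: after k columns the matrix is the four partially-filled rows
lemma outer_fold (motifs : List String) (cols k : Nat) (hk : k ≤ cols) :
    (PySem.List.pyRange 0 (k : Int) 1).foldl (fun count i => motifs.foldl (pvStepA i) count)
      [List.replicate cols (0 : Int), List.replicate cols (0 : Int),
       List.replicate cols (0 : Int), List.replicate cols (0 : Int)]
    = [pvPart (fun j => ((pvCol motifs (j : Int)).count 'A' : Int)) cols k,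
       pvPart (fun j => ((pvCol motifs (j : Int)).count 'C' : Int)) cols k,
       pvPart (fun j => ((pvCol motifs (j : Int)).count 'G' : Int)) cols k,
       pvPart (fun j => ((pvCol motifs (j : Int)).countP pvNotACG : Int)) cols k] := by
  induction k with
  | zero => simp [PySem.List.pyRange_one_eq_nil, part_zero]
  | succ k ih =>
    have hsplit : PySem.List.pyRange 0 ((k + 1 : Nat) : Int) 1
        = PySem.List.pyRange 0 (k : Int) 1 ++ [(k : Int)] := by
      push_cast
      exact PySem.List.pyRange_one_succ_right (by omega)
    rw [hsplit, List.foldl_append, ih (by omega)]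
    simp only [List.foldl_cons, List.foldl_nil]
    rw [inner_fold]
    simp only [Int.toNat_natCast]
    rw [part_modify, part_modify, part_modify, part_modify]

-- ---- B-side: the nested fold is a counter over the flat list of (column, character) cells ----

-- B's histogram update, named (defeq to the lambda in the port)
def pvIns (d : PySem.Dict (Int × Char) Int) (k : Int × Char) : PySem.Dict (Int × Char) Int :=
  d.insert k (d.getD k 0 + 1)

-- the cells one motif contributes, in B's visiting order
def pvCellsOf (cols : Int) (m : String) : List (Int × Char) :=
  (PySem.List.pyRange 0 cols 1).map (fun i => (i, (PySem.Str.pyGet? m i).getD ' '))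

-- all cells, row-major (B's traversal order)
def pvCells (motifs : List String) (cols : Int) : List (Int × Char) :=
  motifs.flatMap (pvCellsOf cols)

lemma nested_fold_eq (ms : List String) (cols : Int) (d : PySem.Dict (Int × Char) Int) :
    ms.foldl (fun d m =>
      (PySem.List.pyRange 0 cols 1).foldl (fun d i => pvIns d (i, (PySem.Str.pyGet? m i).getD ' ')) d) d
    = (pvCells ms cols).foldl pvIns d := by
  induction ms generalizing d with
  | nil => simp [pvCells]
  | cons m ms ih =>
    rw [List.foldl_cons, ih]
    simp only [pvCells, List.flatMap_cons, List.foldl_append]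
    rw [show (PySem.List.pyRange 0 cols 1).foldl
          (fun d i => pvIns d (i, (PySem.Str.pyGet? m i).getD ' ')) d
        = (pvCellsOf cols m).foldl pvIns d from (List.foldl_map).symm]

-- the cells of one motif contain (i, ch) once iff its character at column i is ch
lemma count_cellsOf (m : String) (cols i : Int) (ch : Char) (h0 : 0 ≤ i) (hc : i < cols) :
    (pvCellsOf cols m).count (i, ch)
    = if (PySem.Str.pyGet? m i).getD ' ' = ch then 1 else 0 := by
  by_cases h : (PySem.Str.pyGet? m i).getD ' ' = ch
  · rw [if_pos h]
    have hinj : Function.Injective (fun j : Int => (j, (PySem.Str.pyGet? m j).getD ' ')) := by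
      intro a b hab
      simpa using congrArg Prod.fst hab
    have hkey : (i, ch) = (fun j : Int => (j, (PySem.Str.pyGet? m j).getD ' ')) i := by
      show (i, ch) = (i, (PySem.Str.pyGet? m i).getD ' ')
      rw [h]
    rw [pvCellsOf, hkey, List.count_map_of_injective _ _ hinj,
        List.count_eq_one_of_mem (PySem.List.nodup_pyRange_one 0 cols)
          (PySem.List.mem_pyRange_one.mpr ⟨h0, hc⟩)]
  · rw [if_neg h, List.count_eq_zero]
    intro hmem
    rcases List.mem_map.mp hmem with ⟨j, _, hj⟩
    have hji : j = i := congrArg Prod.fst hj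
    exact h (by rw [← hji]; exact congrArg Prod.snd hj)

lemma count_cells (ms : List String) (cols i : Int) (ch : Char) (h0 : 0 ≤ i) (hc : i < cols) :
    (pvCells ms cols).count (i, ch) = (pvCol ms i).count ch := by
  induction ms with
  | nil => simp [pvCells, pvCol]
  | cons m ms ih =>
    rw [show pvCells (m :: ms) cols = pvCellsOf cols m ++ pvCells ms cols from rfl,
        List.count_append, ih, count_cellsOf m cols i ch h0 hc,
        show pvCol (m :: ms) i = ((PySem.Str.pyGet? m i).getD ' ') :: pvCol ms i from rfl,
        List.count_cons]
    rcases eq_or_ne ((PySem.Str.pyGet? m i).getD ' ') ch with h | h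
    · rw [if_pos h, if_pos (beq_iff_eq.mpr h)]
      omega
    · rw [if_neg h, if_neg (by simpa using h)]
      omega

-- every character of a column falls into exactly one of the four buckets
lemma col_partition (col : List Char) :
    col.count 'A' + col.count 'C' + col.count 'G' + col.countP pvNotACG = col.length := by
  induction col with
  | nil => rfl
  | cons c cs ih =>
    by_cases hA : c = 'A'
    · subst hA; simp [pvNotACG]; omega
    · by_cases hC : c = 'C'
      · subst hC; simp [pvNotACG]; omega
      · by_cases hG : c = 'G'
        · subst hG; simp [pvNotACG]; omega
        · simp [pvNotACG, hA, hC, hG]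
          omega

lemma part_full (cnt : Nat → Int) (cols : Nat) :
    (pvPart cnt cols cols).map (fun x => x + 1) = (List.range cols).map (fun j => cnt j + 1) := by
  simp only [pvPart, List.map_map]
  apply List.map_congr_left
  intro j hj
  simp [List.mem_range.mp hj]

-- the histogram lookup B performs is exactly the per-column count A accumulates
lemma freq_getD (motifs : List String) (cols : Int) (i : Int) (ch : Char)
    (h0 : 0 ≤ i) (hc : i < cols) :
    ((pvCells motifs cols).foldl pvIns PySem.Dict.empty).getD (i, ch) 0
    = ((pvCol motifs i).count ch : Int) := by
  rw [show (pvCells motifs cols).foldl pvIns PySem.Dict.empty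
        = PySem.Dict.counter (pvCells motifs cols) from
      PySem.Dict.foldl_insert_getD_add_one_eq_counter _,
    PySem.Dict.getD_counter, count_cells motifs cols i ch h0 hc]

theorem Count_eq_alt (motifs : List String) : Count motifs = Count_alt motifs := by
  show ((PySem.List.pyRange 0 (((PySem.List.pyGetD motifs 0 "").toList.length : Nat) : Int) 1).foldl
      (fun count i => motifs.foldl (pvStepA i) count)
      [List.replicate (PySem.List.pyGetD motifs 0 "").toList.length (0 : Int),
       List.replicate (PySem.List.pyGetD motifs 0 "").toList.length (0 : Int),
       List.replicate (PySem.List.pyGetD motifs 0 "").toList.length (0 : Int),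
       List.replicate (PySem.List.pyGetD motifs 0 "").toList.length (0 : Int)]).map
      (fun row => row.map (fun x => x + 1))
    = (fun freq : PySem.Dict (Int × Char) Int =>
        [(PySem.List.pyRange 0 (((PySem.List.pyGetD motifs 0 "").toList.length : Nat) : Int) 1).map
            (fun i => freq.getD (i, 'A') 0 + 1),
         (PySem.List.pyRange 0 (((PySem.List.pyGetD motifs 0 "").toList.length : Nat) : Int) 1).map
            (fun i => freq.getD (i, 'C') 0 + 1),
         (PySem.List.pyRange 0 (((PySem.List.pyGetD motifs 0 "").toList.length : Nat) : Int) 1).map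
            (fun i => freq.getD (i, 'G') 0 + 1),
         (PySem.List.pyRange 0 (((PySem.List.pyGetD motifs 0 "").toList.length : Nat) : Int) 1).map
            (fun i => (motifs.length : Int) - freq.getD (i, 'A') 0 - freq.getD (i, 'C') 0
               - freq.getD (i, 'G') 0 + 1)])
      (motifs.foldl (fun freq motif =>
        (PySem.List.pyRange 0 (((PySem.List.pyGetD motifs 0 "").toList.length : Nat) : Int) 1).foldl
          (fun freq i => pvIns freq (i, (PySem.Str.pyGet? motif i).getD ' ')) freq) PySem.Dict.empty)
  rw [outer_fold motifs _ _ le_rfl, nested_fold_eq]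
  simp only [List.map_cons, List.map_nil, part_full, PySem.List.pyRange_zero_nat, List.map_map]
  refine congrArg₂ (· :: ·) ?_ (congrArg₂ (· :: ·) ?_ (congrArg₂ (· :: ·) ?_ (congrArg₂ (· :: ·) ?_ rfl)))
  case _ | _ | _ =>
    apply List.map_congr_left
    intro j hj
    have hjc : j < (PySem.List.pyGetD motifs 0 "").toList.length := List.mem_range.mp hj
    simp only [Function.comp]
    rw [freq_getD motifs _ (j : Int) _ (Int.natCast_nonneg j) (by exact_mod_cast hjc)]
  -- the fourth row additionally uses the partition of the column into the four buckets
  apply List.map_congr_left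
  intro j hj
  have hjc : j < (PySem.List.pyGetD motifs 0 "").toList.length := List.mem_range.mp hj
  simp only [Function.comp]
  rw [freq_getD motifs _ (j : Int) 'A' (Int.natCast_nonneg j) (by exact_mod_cast hjc),
      freq_getD motifs _ (j : Int) 'C' (Int.natCast_nonneg j) (by exact_mod_cast hjc),
      freq_getD motifs _ (j : Int) 'G' (Int.natCast_nonneg j) (by exact_mod_cast hjc)]
  have hpart := col_partition (pvCol motifs (j : Int))
  have hlen : (pvCol motifs (j : Int)).length = motifs.length := by simp [pvCol]
  omega

-- ===== VERDICT (by name: the statement is the Claim_ definition above) =====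
theorem Count_spec : Claim_equal_Count := by
  intro motifs _ _
  unfold Spec_Count
  exact Count_eq_alt motifs
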